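-- pv_equiv track=rewrite | github.com/s2e-lab/Code-Smell-Code-Generation | Validation/PylintSamples/C0200_4165.py | uni_total
-- ===== SOURCE A (Python) =====
-- def uni_total(string):
--     char_uni = {" ":32, "0":48, "1":49, "2":50, "3":51, "4":52, "5":53, "6":54, "7":55, "8":56, "9":57, "A":65, "B":66, "C":67, "D":68, "E":69, "F":70, "G":71, "H":72, "I":73, "J":74, "K":75, "L":76, "M":77, "N":78, "O":79, "P":80, "Q":81, "R":82, "S":83, "T":84, "U":85, "V":86, "W":87, "X":88, "Y":89, "Z":90, "a":97, "b":98, "c":99, "d":100, "e":101, "f":102, "g":103, "h":104, "i":105, "j":106, "k":107, "l":108, "m":109, "n":110, "o":111, "p":112, "q":113, "r":114, "s":115, "t":116, "u":117, "v":118, "w":119, "x":120, "y":121, "z":122}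
--     string_lst  = list(string)
--     uni_lst = []
--
--     for i in string_lst:
--         for char, uni in char_uni.items():
--             if char == i:
--                 uni_lst += [uni]
--                 continue
--         if i == " ":
--             continue
--
--     return sum(uni_lst)
-- ===== SOURCE B (Python) =====
-- def uni_total(string):
--     total = 0
--     for c in string:
--         o = ord(c)
--         if c == " " or 48 <= o <= 57 or 65 <= o <= 90 or 97 <= o <= 122:
--             total += o
--     return total
-- ===== Notes on version B (the rewrite author's own statement) =====
-- stated objective: simpler
-- what changed: Drops the 64-entry character table and its inner scan per character; a single pass computes ord(c) and adds it when c is a space, ASCII digit or ASCII letter by arithmetic range tests.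
import Mathlib
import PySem

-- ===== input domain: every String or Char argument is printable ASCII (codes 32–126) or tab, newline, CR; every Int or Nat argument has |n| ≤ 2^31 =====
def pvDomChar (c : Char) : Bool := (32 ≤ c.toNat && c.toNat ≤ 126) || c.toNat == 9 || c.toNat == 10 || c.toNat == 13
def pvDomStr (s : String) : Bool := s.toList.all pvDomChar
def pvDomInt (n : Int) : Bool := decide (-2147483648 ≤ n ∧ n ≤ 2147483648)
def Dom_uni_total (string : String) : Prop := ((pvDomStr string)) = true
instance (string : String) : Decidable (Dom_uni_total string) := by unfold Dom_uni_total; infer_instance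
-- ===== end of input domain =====

-- B drops A's 64-entry table and its inner scan: one pass adding ord(c) under ASCII range tests (simpler).

-- ===== PORT A =====
-- A's dict literal char_uni, in insertion order (keys are one-char strings, ported as Char).
def pvCharUni : List (Char × Int) :=
  [(' ',32), ('0',48), ('1',49), ('2',50), ('3',51), ('4',52), ('5',53), ('6',54), ('7',55), ('8',56), ('9',57),
   ('A',65), ('B',66), ('C',67), ('D',68), ('E',69), ('F',70), ('G',71), ('H',72), ('I',73), ('J',74), ('K',75),
   ('L',76), ('M',77), ('N',78), ('O',79), ('P',80), ('Q',81), ('R',82), ('S',83), ('T',84), ('U',85), ('V',86),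
   ('W',87), ('X',88), ('Y',89), ('Z',90), ('a',97), ('b',98), ('c',99), ('d',100), ('e',101), ('f',102),
   ('g',103), ('h',104), ('i',105), ('j',106), ('k',107), ('l',108), ('m',109), ('n',110), ('o',111), ('p',112),
   ('q',113), ('r',114), ('s',115), ('t',116), ('u',117), ('v',118), ('w',119), ('x',120), ('y',121), ('z',122)]

def uni_total (string : String) : Int :=
  let string_lst := string.toList
  let uni_lst : List Int :=
    string_lst.foldl (fun uni_lst i =>
      -- inner loop over char_uni.items(); the trailing 'if i == " ": continue' is a no-op
      pvCharUni.foldl (fun acc p => if p.1 == i then acc ++ [p.2] else acc) uni_lst) []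
  uni_lst.sum

-- ===== PORT B =====
def pvRecognized (c : Char) : Bool :=
  let o : Int := (c.toNat : Int)
  c == ' ' || (48 ≤ o && o ≤ 57) || (65 ≤ o && o ≤ 90) || (97 ≤ o && o ≤ 122)

def uni_total_alt (string : String) : Int :=
  string.toList.foldl (fun total c => if pvRecognized c then total + (c.toNat : Int) else total) 0

-- ===== PRECONDITION & SPEC =====
def Spec_uni_total (string : String) (out : Int) : Prop := out = uni_total_alt string
instance (string : String) (out : Int) : Decidable (Spec_uni_total string out) := by unfold Spec_uni_total; infer_instance

-- ===== CLAIM (what is proved, stated in full; the proofs are below) =====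
def Claim_equal_uni_total : Prop := ∀ (string : String), Dom_uni_total string → Spec_uni_total string (uni_total string)

-- ===== LEMMAS AND PROOFS =====

-- A's table keys in order, and the table as key ↦ (key, ord key)
def pvKeys : List Char := " 0123456789ABCDEFGHIJKLMNOPQRSTUVWXYZabcdefghijklmnopqrstuvwxyz".toList

theorem pv_table_eq : pvCharUni = pvKeys.map (fun k => (k, (k.toNat : Int))) := by decide

def pvInnerOn (l : List (Char × Int)) (i : Char) : List Int :=
  l.foldl (fun acc p => if p.1 == i then acc ++ [p.2] else acc) []

-- the inner scan over the table with accumulator acc is acc ++ (scan from [])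
theorem pv_inner_append (l : List (Char × Int)) (i : Char) (acc : List Int) :
    l.foldl (fun acc p => if p.1 == i then acc ++ [p.2] else acc) acc
      = acc ++ pvInnerOn l i := by
  unfold pvInnerOn
  induction l generalizing acc with
  | nil => simp
  | cons p l ih =>
    simp only [List.foldl_cons]
    by_cases h : p.1 == i
    · rw [if_pos h, if_pos h, ih (acc ++ [p.2]), ih ([] ++ [p.2])]; simp
    · rw [if_neg h, if_neg h, ih acc]

-- the inner scan collects exactly the values of matching entries
theorem pv_inner_filter (l : List (Char × Int)) (i : Char) :
    pvInnerOn l i = (l.filter (fun p => p.1 == i)).map Prod.snd := by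
  induction l with
  | nil => rfl
  | cons p l ih =>
    unfold pvInnerOn
    rw [List.foldl_cons, List.filter_cons]
    by_cases h : p.1 == i
    · rw [if_pos h, if_pos h, pv_inner_append]
      simp [ih]
    · rw [if_neg h, if_neg h]
      exact ih

-- filtering a duplicate-free list for equality with c yields [c] or []
theorem pv_filter_nodup (l : List Char) (c : Char) (h : l.Nodup) :
    l.filter (fun k => k == c) = if c ∈ l then [c] else [] := by
  induction l with
  | nil => simp
  | cons a l ih =>
    rw [List.nodup_cons] at h
    by_cases hac : a = c
    · subst hac
      have h0 : l.filter (fun k => k == a) = [] := by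
        rw [ih h.2, if_neg h.1]
      simp [List.filter_cons, h0]
    · have hmem : (c ∈ a :: l) ↔ c ∈ l := by
        constructor
        · intro hm
          rcases List.mem_cons.mp hm with h' | h'
          · exact absurd h'.symm hac
          · exact h'
        · exact fun h' => List.mem_cons_of_mem a h'
      rw [List.filter_cons, if_neg (by simp [hac]), ih h.2]
      by_cases hcl : c ∈ l
      · rw [if_pos hcl, if_pos (hmem.mpr hcl)]
      · rw [if_neg hcl, if_neg (fun hm => hcl (hmem.mp hm))]

set_option maxRecDepth 4000 in
theorem pv_keys_nodup : pvKeys.Nodup := by decide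

-- membership in A's key list agrees with B's range tests, for every code < 127
set_option maxRecDepth 4000 in
theorem pv_keys_mem (n : Nat) (hn : n < 127) :
    decide (Char.ofNat n ∈ pvKeys) = pvRecognized (Char.ofNat n) := by
  revert n hn; decide

-- per-character value of A's inner scan, for every domain character
theorem pv_inner_char (c : Char) (hc : pvDomChar c = true) :
    pvInnerOn pvCharUni c = if pvRecognized c then [(c.toNat : Int)] else [] := by
  have hlt : c.toNat < 127 := by
    simp only [pvDomChar, Bool.or_eq_true, Bool.and_eq_true, decide_eq_true_eq, beq_iff_eq] at hc
    omega
  have hmem : decide (c ∈ pvKeys) = pvRecognized c := by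
    have := pv_keys_mem c.toNat hlt
    rwa [Char.ofNat_toNat c] at this
  have hiff : (c ∈ pvKeys) ↔ pvRecognized c = true := by
    rw [← hmem]; exact decide_eq_true_iff.symm
  rw [pv_inner_filter, pv_table_eq]
  have hfm : ((pvKeys.map (fun k => (k, (k.toNat : Int)))).filter (fun p => p.1 == c))
      = (pvKeys.filter (fun k => k == c)).map (fun k => (k, (k.toNat : Int))) := by
    induction pvKeys with
    | nil => rfl
    | cons a l ih =>
      simp only [List.map_cons, List.filter_cons]
      by_cases h : a == c
      · rw [if_pos h, if_pos h, ih]; rfl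
      · rw [if_neg h, if_neg h, ih]
  rw [hfm, pv_filter_nodup pvKeys c pv_keys_nodup]
  by_cases hr : pvRecognized c
  · rw [if_pos (hiff.mpr hr), if_pos hr]; rfl
  · rw [if_neg (fun hm => hr (hiff.mp hm)), if_neg hr]; rfl

-- shift lemma for B's fold
theorem pv_alt_shift (l : List Char) (t : Int) :
    l.foldl (fun total c => if pvRecognized c then total + (c.toNat : Int) else total) t
      = t + l.foldl (fun total c => if pvRecognized c then total + (c.toNat : Int) else total) 0 := by
  induction l generalizing t with
  | nil => simp
  | cons c l ih =>
    simp only [List.foldl_cons]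
    by_cases h : pvRecognized c
    · rw [if_pos h, if_pos h, ih (t + (c.toNat : Int)), ih ((0 : Int) + (c.toNat : Int))]; ring
    · rw [if_neg h, if_neg h, ih t]

theorem pv_main (l : List Char) (acc : List Int) (hl : l.all pvDomChar = true) :
    (l.foldl (fun uni_lst i =>
        pvCharUni.foldl (fun acc p => if p.1 == i then acc ++ [p.2] else acc) uni_lst) acc).sum
      = acc.sum + l.foldl (fun total c => if pvRecognized c then total + (c.toNat : Int) else total) 0 := by
  induction l generalizing acc with
  | nil => simp
  | cons c l ih =>
    simp only [List.all_cons, Bool.and_eq_true] at hl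
    simp only [List.foldl_cons]
    rw [pv_inner_append, ih _ hl.2, pv_inner_char c hl.1]
    by_cases h : pvRecognized c
    · rw [if_pos h, if_pos h, pv_alt_shift l ((0 : Int) + (c.toNat : Int))]
      simp [List.sum_append]; ring
    · rw [if_neg h, if_neg h]; simp

-- ===== VERDICT (by name: the statement is the Claim_ definition above) =====
theorem uni_total_spec : Claim_equal_uni_total := by
  intro s hdom
  unfold Spec_uni_total uni_total uni_total_alt
  have := pv_main s.toList [] hdom
  simpa using this
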